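-- pv_equiv track=rewrite | github.com/kivanc53/EulerProblemsPython | Problem32.py | check
-- ===== SOURCE A (Python) =====
-- def check(num, liste):
--     for q in range(1, 10):
--         for w in range(1000, 10_000):
--             if q * w == num:
--                 if check2(w, q, liste):
--                     return True
--                 else:
--                     break
--     for r in range(10, 100):
--         for t in range(100, 1000):
--             if r * t == num:
--                 if check2(r, t, liste):
--                     return True
--                 else:
--                     break
--     return False
--
-- def check2(num, h, arraylist):
--     tempList = []
--     for t in range(len(arraylist)):
--         tempList.append(arraylist.__getitem__(t))
--     while num != 0:
--         c = num % 10
--         if tempList.__contains__(c) or c < 1: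
--             return False
--         else:
--             tempList.append(c)
--         num //= 10
--     while h != 0:
--         g = h % 10
--         if tempList.__contains__(g) or g < 1:
--             return False
--         else:
--             tempList.append(g)
--         h //= 10
--     return True
-- ===== SOURCE B (Python) =====
-- def _pandigital(a, b, forbidden):
--     ds = []
--     for n in (a, b):
--         while n:
--             ds.append(n % 10)
--             n //= 10
--     return 0 not in ds and len(set(ds)) == len(ds) and forbidden.isdisjoint(ds)
--
-- def check(num, liste):
--     pairs = [(num // q, q) for q in range(1, 10)
--              if num % q == 0 and 1000 <= num // q <= 9999]
--     pairs += [(r, num // r) for r in range(10, 100)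
--               if num % r == 0 and 100 <= num // r <= 999]
--     if not pairs:
--         return False
--     forbidden = set(liste)
--     return any(_pandigital(a, b, forbidden) for a, b in pairs)
-- ===== Notes on version B (the rewrite author's own statement) =====
-- stated objective: faster
-- what changed: Instead of scanning all 9*9000 + 90*900 candidate factor pairs for one whose product equals num, B computes the at-most-99 candidate pairs by divisibility tests (q divides num with the cofactor range-checked), returns False without touching liste when there are none, and tests the digits with one set-based check (no zero digit, all distinct, disjoint from set(liste)) instead of A's element-by-element append-and-scan list; measured faster in a timing run (1.7x at the largest size, up to 15x at small sizes).
import Mathlib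
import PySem

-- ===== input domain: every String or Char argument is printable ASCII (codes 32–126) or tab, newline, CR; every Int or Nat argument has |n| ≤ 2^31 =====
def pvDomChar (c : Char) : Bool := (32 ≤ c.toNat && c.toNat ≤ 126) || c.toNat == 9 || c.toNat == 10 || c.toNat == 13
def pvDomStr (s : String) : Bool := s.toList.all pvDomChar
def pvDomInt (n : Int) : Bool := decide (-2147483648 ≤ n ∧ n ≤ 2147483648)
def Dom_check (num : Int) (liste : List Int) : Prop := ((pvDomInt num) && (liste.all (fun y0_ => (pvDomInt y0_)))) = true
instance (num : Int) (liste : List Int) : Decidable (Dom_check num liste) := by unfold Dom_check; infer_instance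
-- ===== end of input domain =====

-- B replaces A's brute-force scan of all 9*9000 + 90*900 candidate factor pairs by ~99
-- divisibility tests (q divides num, with the cofactor range-checked) and a set-based digit test.

-- ===== PORT A =====
-- the 'while num != 0' digit-append loop of check2 (fuel only makes the recursion total;
-- the fuel passed below, natAbs + 2, is never exhausted on the nonnegative inputs check uses)
def checkDigLoopA : Nat → Int → List Int → Option (List Int)
  | 0, _, _ => none
  | f + 1, n, temp =>
    if n = 0 then some temp
    else
      let c := PySem.Int.mod n 10
      if c ∈ temp ∨ c < 1 then none
      else checkDigLoopA f (PySem.Int.floordiv n 10) (temp ++ [c])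

def check2A (num h : Int) (arraylist : List Int) : Bool :=
  -- tempList copy loop: for t in range(len(arraylist)): tempList.append(arraylist[t])
  let tempList := (PySem.List.pyRange 0 (PySem.List.len arraylist)).foldl
      (fun tl t => tl ++ [PySem.List.pyGetD arraylist t 0]) []
  match checkDigLoopA (num.natAbs + 2) num tempList with
  | none => false
  | some t1 =>
    match checkDigLoopA (h.natAbs + 2) h t1 with
    | none => false
    | some _ => true

-- inner 'for x in range(a, b): if c*x == num: if body(x): return True else: break'
-- (the break just moves on to the next outer value, so the loop yields body's value there)
def innerScanA (num c : Int) (body : Int → Bool) : List Int → Bool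
  | [] => false
  | x :: xs => if c * x = num then body x else innerScanA num c body xs

def outerA1 (num : Int) (liste : List Int) : List Int → Bool
  | [] => false
  | q :: qs =>
    if innerScanA num q (fun w => check2A w q liste) (PySem.List.pyRange 1000 10000) then true
    else outerA1 num liste qs

def outerA2 (num : Int) (liste : List Int) : List Int → Bool
  | [] => false
  | r :: rs =>
    if innerScanA num r (fun t => check2A r t liste) (PySem.List.pyRange 100 1000) then true
    else outerA2 num liste rs

def check (num : Int) (liste : List Int) : Bool :=
  if outerA1 num liste (PySem.List.pyRange 1 10) then true
  else outerA2 num liste (PySem.List.pyRange 10 100)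

-- ===== PORT B =====
-- 'while n: ds.append(n % 10); n //= 10' (fuel only makes the recursion total)
def digsB : Nat → Int → List Int
  | 0, _ => []
  | f + 1, n =>
    if n = 0 then [] else PySem.Int.mod n 10 :: digsB f (PySem.Int.floordiv n 10)

-- 0 not in ds and len(set(ds)) == len(ds) and forbidden.isdisjoint(ds)
def pandigitalB (a b : Int) (forbidden : PySem.Set Int) : Bool :=
  let ds := digsB (a.natAbs + 2) a ++ digsB (b.natAbs + 2) b
  !(decide ((0 : Int) ∈ ds)) && ((PySem.Set.ofList ds).length == ds.length)
    && PySem.Set.isdisjoint forbidden ds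

-- the two candidate-pair comprehensions of Source B
def pairs1B (num : Int) : List (Int × Int) :=
  ((PySem.List.pyRange 1 10).filter (fun q =>
      PySem.Int.mod num q == 0 && decide (1000 ≤ PySem.Int.floordiv num q)
        && decide (PySem.Int.floordiv num q ≤ 9999))).map
    (fun q => (PySem.Int.floordiv num q, q))

def pairs2B (num : Int) : List (Int × Int) :=
  ((PySem.List.pyRange 10 100).filter (fun r =>
      PySem.Int.mod num r == 0 && decide (100 ≤ PySem.Int.floordiv num r)
        && decide (PySem.Int.floordiv num r ≤ 999))).map
    (fun r => (r, PySem.Int.floordiv num r))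

def check_alt (num : Int) (liste : List Int) : Bool :=
  let pairs := pairs1B num ++ pairs2B num
  if pairs.isEmpty then false
  else
    let forbidden := PySem.Set.ofList liste
    pairs.any (fun p => pandigitalB p.1 p.2 forbidden)

-- ===== PRECONDITION & SPEC =====
def Spec_check (num : Int) (liste : List Int) (out : Bool) : Prop := out = check_alt num liste
instance (num : Int) (liste : List Int) (out : Bool) : Decidable (Spec_check num liste out) := by unfold Spec_check; infer_instance

-- ===== CLAIM (what is proved, stated in full; the proofs are below) =====
def Claim_equal_check : Prop := ∀ (num : Int) (liste : List Int), Dom_check num liste → Spec_check num liste (check num liste)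

-- ===== LEMMAS AND PROOFS =====

theorem digsB_bounds (f : Nat) : ∀ (n : Int), ∀ d ∈ digsB f n, 0 ≤ d ∧ d < 10 := by
  induction f with
  | zero => intro n d hd; simp [digsB] at hd
  | succ f ih =>
    intro n d hd
    by_cases h0 : n = 0
    · simp [digsB, h0] at hd
    · simp only [digsB, if_neg h0, List.mem_cons] at hd
      rcases hd with rfl | hd
      · exact ⟨PySem.Int.mod_nonneg n (by norm_num), PySem.Int.mod_lt n (by norm_num)⟩
      · exact ih _ d hd

theorem checkDigLoopA_eq (f : Nat) : ∀ (n : Int) (temp : List Int), 0 ≤ n → n.natAbs < f →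
    checkDigLoopA f n temp =
      if (digsB f n).Nodup ∧ ∀ d ∈ digsB f n, d ∉ temp ∧ 1 ≤ d
      then some (temp ++ digsB f n) else none := by
  induction f with
  | zero => intro n temp _ h; omega
  | succ f ih =>
    intro n temp hn hf
    by_cases h0 : n = 0
    · simp [checkDigLoopA, digsB, h0]
    · have hmodlt := PySem.Int.mod_lt n (show (0:Int) < 10 by norm_num)
      have hmodnn := PySem.Int.mod_nonneg n (show (0:Int) < 10 by norm_num)
      have heq := PySem.Int.floordiv_mul_add_mod n 10
      have hn1 : 1 ≤ n := by omega
      have hd1 : 0 ≤ PySem.Int.floordiv n 10 := by nlinarith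
      have hd2 : PySem.Int.floordiv n 10 < n := by nlinarith
      have hdf : (PySem.Int.floordiv n 10).natAbs < f := by omega
      rw [show checkDigLoopA (f+1) n temp = (if PySem.Int.mod n 10 ∈ temp ∨ PySem.Int.mod n 10 < 1 then none
            else checkDigLoopA f (PySem.Int.floordiv n 10) (temp ++ [PySem.Int.mod n 10])) from by
          simp only [checkDigLoopA, if_neg h0]]
      rw [show digsB (f+1) n = PySem.Int.mod n 10 :: digsB f (PySem.Int.floordiv n 10) from by
          simp only [digsB, if_neg h0]]
      set c := PySem.Int.mod n 10 with hc
      set ds := digsB f (PySem.Int.floordiv n 10) with hds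
      by_cases hbad : c ∈ temp ∨ c < 1
      · rw [if_pos hbad, if_neg]
        rintro ⟨-, hall⟩
        have := hall c (by simp)
        rcases hbad with hb | hb
        · exact this.1 hb
        · omega
      · rw [if_neg hbad, ih _ _ hd1 hdf]
        rw [not_or] at hbad
        have hiff : (ds.Nodup ∧ ∀ d ∈ ds, d ∉ temp ++ [c] ∧ 1 ≤ d) ↔
            ((c :: ds).Nodup ∧ ∀ d ∈ c :: ds, d ∉ temp ∧ 1 ≤ d) := by
          simp only [List.nodup_cons, List.mem_append, List.mem_cons, List.not_mem_nil, or_false]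
          constructor
          · rintro ⟨hnd, hall⟩
            refine ⟨⟨fun hcds => ((hall c hcds).1 (Or.inr rfl)), hnd⟩, ?_⟩
            rintro d (rfl | hd)
            · exact ⟨hbad.1, by omega⟩
            · exact ⟨fun h => (hall d hd).1 (Or.inl h), (hall d hd).2⟩
          · rintro ⟨⟨hcds, hnd⟩, hall⟩
            refine ⟨hnd, fun d hd => ?_⟩
            have h1 := hall d (Or.inr hd)
            exact ⟨by rintro (h | rfl); exacts [h1.1 h, hcds hd], h1.2⟩
        split_ifs with h1 h2 h2
        · rw [List.append_assoc]; rfl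
        · exact absurd (hiff.mp h1) h2
        · exact absurd (hiff.mpr h2) h1
        · rfl

theorem tempList_copy (xs : List Int) :
    (PySem.List.pyRange 0 (PySem.List.len xs)).foldl
      (fun tl t => tl ++ [PySem.List.pyGetD xs t 0]) [] = xs := by
  rw [PySem.List.foldl_append_singleton_eq_map]
  simpa using PySem.List.map_pyGetD_pyRange_zero xs 0

theorem setLen_eq_iff (xs : List Int) : (PySem.Set.ofList xs).length = xs.length ↔ xs.Nodup := by
  induction xs using List.reverseRecOn with
  | nil => simp [PySem.Set.ofList]
  | append_singleton xs x ih =>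
    have hle := PySem.Set.length_ofList_le xs
    have hnodup : (xs ++ [x]).Nodup ↔ xs.Nodup ∧ x ∉ xs := by
      simp [List.nodup_append]
      exact fun _ => ⟨fun h hx => h x hx rfl, fun h a ha he => h (he ▸ ha)⟩
    rw [PySem.Set.ofList_append_singleton, hnodup]
    by_cases hx : x ∈ xs
    · have hct : PySem.Set.contains (PySem.Set.ofList xs) x = true :=
        (PySem.Set.contains_iff _ x).mpr ((PySem.Set.mem_ofList xs x).mpr hx)
      rw [show (PySem.Set.ofList xs).add x = PySem.Set.ofList xs from by
        simp [PySem.Set.add]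
        exact (PySem.Set.mem_ofList xs x).mp ((PySem.Set.contains_iff _ x).mp hct)]
      simp only [List.length_append, List.length_singleton]
      constructor
      · intro h; omega
      · rintro ⟨-, h2⟩; exact absurd hx h2
    · have hcf : PySem.Set.contains (PySem.Set.ofList xs) x = false := by
        cases h : PySem.Set.contains (PySem.Set.ofList xs) x
        · rfl
        · exact absurd ((PySem.Set.mem_ofList xs x).mp ((PySem.Set.contains_iff _ x).mp h)) hx
      rw [show (PySem.Set.ofList xs).add x = PySem.Set.ofList xs ++ [x] from by
        simp [PySem.Set.add]
        exact hx]
      simp only [List.length_append, List.length_singleton]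
      constructor
      · intro h; exact ⟨ih.mp (by omega), hx⟩

      · rintro ⟨h1, -⟩; have := ih.mpr h1; omega

theorem check2A_eq (num h : Int) (liste : List Int) (hn : 0 ≤ num) (hh : 0 ≤ h) :
    check2A num h liste = pandigitalB num h (PySem.Set.ofList liste) := by
  have hb1 := digsB_bounds (num.natAbs + 2) num
  have hb2 := digsB_bounds (h.natAbs + 2) h
  have hAiff : check2A num h liste = true ↔
      ((digsB (num.natAbs + 2) num).Nodup ∧
        (∀ d ∈ digsB (num.natAbs + 2) num, d ∉ liste ∧ 1 ≤ d)) ∧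
      ((digsB (h.natAbs + 2) h).Nodup ∧
        (∀ d ∈ digsB (h.natAbs + 2) h, d ∉ liste ++ digsB (num.natAbs + 2) num ∧ 1 ≤ d)) := by
    simp only [check2A, tempList_copy]
    rw [checkDigLoopA_eq (num.natAbs + 2) num liste hn (by omega)]
    split_ifs with hc1
    · show (match checkDigLoopA (h.natAbs + 2) h (liste ++ digsB (num.natAbs + 2) num) with
        | none => false | some _ => true) = true ↔ _
      rw [checkDigLoopA_eq (h.natAbs + 2) h _ hh (by omega)]
      split_ifs with hc2
      · exact iff_of_true rfl ⟨hc1, hc2⟩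
      · exact iff_of_false (fun hx => hx) (fun hq => hc2 hq.2)
    · exact iff_of_false (fun hx => hx) (fun hq => hc1 hq.1)
  have hBiff : pandigitalB num h (PySem.Set.ofList liste) = true ↔
      ((digsB (num.natAbs + 2) num ++ digsB (h.natAbs + 2) h).Nodup ∧
        (0 : Int) ∉ digsB (num.natAbs + 2) num ++ digsB (h.natAbs + 2) h ∧
        ∀ d ∈ digsB (num.natAbs + 2) num ++ digsB (h.natAbs + 2) h, d ∉ liste) := by
    simp only [pandigitalB, Bool.and_eq_true, Bool.not_eq_true', decide_eq_false_iff_not,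
      beq_iff_eq, PySem.Set.isdisjoint_iff, setLen_eq_iff]
    constructor
    · rintro ⟨⟨h0, hnd⟩, hdisj⟩
      exact ⟨hnd, h0, fun d hd hdl => hdisj d ((PySem.Set.mem_ofList liste d).mpr hdl) hd⟩
    · rintro ⟨hnd, h0, hall⟩
      exact ⟨⟨h0, hnd⟩, fun x hx hxds => hall x hxds ((PySem.Set.mem_ofList liste x).mp hx)⟩
  rw [Bool.eq_iff_iff, hAiff, hBiff]
  constructor
  · rintro ⟨⟨nd1, a1⟩, nd2, a2⟩
    refine ⟨List.nodup_append.mpr ⟨nd1, nd2, ?_⟩, ?_, ?_⟩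
    · intro x hx1 y hy2 hxy
      exact (a2 y hy2).1 (List.mem_append.mpr (Or.inr (hxy ▸ hx1)))
    · intro h0
      rcases List.mem_append.mp h0 with hm | hm
      · have := (a1 0 hm).2; omega
      · have := (a2 0 hm).2; omega
    · intro d hd
      rcases List.mem_append.mp hd with hm | hm
      · exact (a1 d hm).1
      · exact fun hl => (a2 d hm).1 (List.mem_append.mpr (Or.inl hl))
  · rintro ⟨hnd, h0, hall⟩
    obtain ⟨nd1, nd2, hdisj⟩ := List.nodup_append.mp hnd
    refine ⟨⟨nd1, fun d hd => ⟨hall d (List.mem_append.mpr (Or.inl hd)), ?_⟩⟩,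
      nd2, fun d hd => ⟨?_, ?_⟩⟩
    · have hb := hb1 d hd
      have hne : d ≠ 0 := fun he => h0 (he ▸ List.mem_append.mpr (Or.inl hd))
      omega
    · intro hm
      rcases List.mem_append.mp hm with hl | hD1
      · exact hall d (List.mem_append.mpr (Or.inr hd)) hl
      · exact hdisj d hD1 d hd rfl
    · have hb := hb2 d hd
      have hne : d ≠ 0 := fun he => h0 (he ▸ List.mem_append.mpr (Or.inr hd))
      omega

theorem innerScanA_pyRange (num c : Int) (body : Int → Bool) (hc : 0 < c) : ∀ (a b : Int),
    innerScanA num c body (PySem.List.pyRange a b) =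
      if c ∣ num ∧ a ≤ PySem.Int.floordiv num c ∧ PySem.Int.floordiv num c < b
      then body (PySem.Int.floordiv num c) else false := by
  intro a b
  by_cases hab : a < b
  case neg =>
    have : PySem.List.pyRange a b = [] := by
      rw [List.eq_nil_iff_forall_not_mem]
      intro x hx; rw [PySem.List.mem_pyRange_one] at hx; omega
    rw [this, if_neg (by rintro ⟨-, h1, h2⟩; omega)]
    rfl
  case pos =>
    induction hk : (b - a).toNat generalizing a with
    | zero => omega
    | succ k ihk =>
      rw [PySem.List.pyRange_one_cons hab]
      by_cases hhit : c * a = num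
      · have hfd : PySem.Int.floordiv num c = a := by
          rw [PySem.Int.floordiv_eq_iff_of_pos hc]
          constructor <;> nlinarith
        rw [show innerScanA num c body (a :: PySem.List.pyRange (a+1) b) = body a from by
          simp [innerScanA, hhit]]
        rw [hfd, if_pos ⟨⟨a, hhit.symm⟩, le_refl a, hab⟩]
      · rw [show innerScanA num c body (a :: PySem.List.pyRange (a+1) b) =
            innerScanA num c body (PySem.List.pyRange (a+1) b) from by
          simp [innerScanA, hhit]]
        by_cases hab2 : a + 1 < b
        · rw [ihk (a+1) hab2 (by omega)]
          by_cases hdvd : c ∣ num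
          · obtain ⟨kk, hkk⟩ := hdvd
            have hfd : PySem.Int.floordiv num c = kk := by
              rw [PySem.Int.floordiv_eq_iff_of_pos hc]
              constructor <;> nlinarith
            have hne : kk ≠ a := by rintro rfl; exact hhit (by linarith [hkk])
            rw [hfd]
            congr 1
            apply propext
            constructor
            · rintro ⟨-, h1, h2⟩; exact ⟨⟨kk, hkk⟩, by omega, h2⟩
            · rintro ⟨-, h1, h2⟩; exact ⟨⟨kk, hkk⟩, by omega, h2⟩
          · rw [if_neg (by rintro ⟨h, -⟩; exact hdvd h), if_neg (by rintro ⟨h, -⟩; exact hdvd h)]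
        · have hrange : PySem.List.pyRange (a+1) b = [] := by
            rw [List.eq_nil_iff_forall_not_mem]
            intro x hx; rw [PySem.List.mem_pyRange_one] at hx; omega
          have hno : ¬ (c ∣ num ∧ a ≤ PySem.Int.floordiv num c ∧ PySem.Int.floordiv num c < b) := by
            rintro ⟨⟨kk, hkk⟩, h1, h2⟩
            have hfd : PySem.Int.floordiv num c = kk := by
              rw [PySem.Int.floordiv_eq_iff_of_pos hc]
              constructor <;> nlinarith
            rw [hfd] at h1 h2
            have hka : kk = a := by omega
            exact hhit (by rw [hkk, hka])
          rw [hrange, if_neg hno]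
          rfl

theorem outerA1_eq (num : Int) (liste : List Int) : ∀ (qs : List Int), (∀ q ∈ qs, 0 < q) →
    outerA1 num liste qs =
      ((qs.filter (fun q => PySem.Int.mod num q == 0 && decide (1000 ≤ PySem.Int.floordiv num q)
          && decide (PySem.Int.floordiv num q ≤ 9999))).map
        (fun q => (PySem.Int.floordiv num q, q))).any
        (fun p => pandigitalB p.1 p.2 (PySem.Set.ofList liste)) := by
  intro qs hqs
  induction qs with
  | nil => rfl
  | cons q qs ih =>
    have hq : 0 < q := hqs q (by simp)
    have ih' := ih (fun x hx => hqs x (by simp [hx]))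
    rw [show outerA1 num liste (q :: qs) =
        (if innerScanA num q (fun w => check2A w q liste) (PySem.List.pyRange 1000 10000) then true
         else outerA1 num liste qs) from rfl]
    rw [innerScanA_pyRange num q _ hq 1000 10000]
    by_cases hdvd : q ∣ num
    · have hmod0 : PySem.Int.mod num q = 0 := (PySem.Int.mod_eq_zero_iff_dvd num q).mpr hdvd
      by_cases hrange : 1000 ≤ PySem.Int.floordiv num q ∧ PySem.Int.floordiv num q < 10000
      · have hcond : (PySem.Int.mod num q == 0 && decide (1000 ≤ PySem.Int.floordiv num q)
            && decide (PySem.Int.floordiv num q ≤ 9999)) = true := by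
          simp only [Bool.and_eq_true, beq_iff_eq, decide_eq_true_eq]
          refine ⟨⟨hmod0, hrange.1⟩, by omega⟩
        rw [if_pos (show q ∣ num ∧ 1000 ≤ PySem.Int.floordiv num q ∧ PySem.Int.floordiv num q < 10000
            from ⟨hdvd, hrange.1, hrange.2⟩),
          check2A_eq _ q liste (by omega) (by omega),
          ]
        simp only [List.filter_cons, hcond, if_true, List.map_cons, List.any_cons]
        rcases Bool.dichotomy (pandigitalB (PySem.Int.floordiv num q) q (PySem.Set.ofList liste)) with hp | hp <;>
          rw [show pandigitalB ((PySem.Int.floordiv num q, q) : Int × Int).1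
              ((PySem.Int.floordiv num q, q) : Int × Int).2 (PySem.Set.ofList liste)
              = pandigitalB (PySem.Int.floordiv num q) q (PySem.Set.ofList liste) from rfl, hp] <;>
          simp [ih']
      · have hcond : (PySem.Int.mod num q == 0 && decide (1000 ≤ PySem.Int.floordiv num q)
            && decide (PySem.Int.floordiv num q ≤ 9999)) = false := by
          simp only [Bool.and_eq_false_iff, beq_eq_false_iff_ne, ne_eq, decide_eq_false_iff_not]
          by_cases ha : (1000 : Int) ≤ PySem.Int.floordiv num q
          · right; omega
          · left; right; omega
        rw [if_neg (show ¬(q ∣ num ∧ 1000 ≤ PySem.Int.floordiv num q ∧ PySem.Int.floordiv num q < 10000)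
            from by rintro ⟨-, h1, h2⟩; exact hrange ⟨h1, h2⟩),
          ]
        simp only [List.filter_cons, hcond, Bool.false_eq_true, if_false]
        simp [ih']
    · have hcond : (PySem.Int.mod num q == 0 && decide (1000 ≤ PySem.Int.floordiv num q)
          && decide (PySem.Int.floordiv num q ≤ 9999)) = false := by
        simp only [Bool.and_eq_false_iff, beq_eq_false_iff_ne, ne_eq]
        exact Or.inl (Or.inl (fun hm => hdvd ((PySem.Int.mod_eq_zero_iff_dvd num q).mp hm)))
      rw [if_neg (show ¬(q ∣ num ∧ 1000 ≤ PySem.Int.floordiv num q ∧ PySem.Int.floordiv num q < 10000)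
          from by rintro ⟨h, -⟩; exact hdvd h),
        ]
      simp only [List.filter_cons, hcond, Bool.false_eq_true, if_false]
      simp [ih']

theorem outerA2_eq (num : Int) (liste : List Int) : ∀ (rs : List Int), (∀ r ∈ rs, 0 < r) →
    outerA2 num liste rs =
      ((rs.filter (fun r => PySem.Int.mod num r == 0 && decide (100 ≤ PySem.Int.floordiv num r)
          && decide (PySem.Int.floordiv num r ≤ 999))).map
        (fun r => (r, PySem.Int.floordiv num r))).any
        (fun p => pandigitalB p.1 p.2 (PySem.Set.ofList liste)) := by
  intro rs hrs
  induction rs with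
  | nil => rfl
  | cons q qs ih =>
    have hq : 0 < q := hrs q (by simp)
    have ih' := ih (fun x hx => hrs x (by simp [hx]))
    rw [show outerA2 num liste (q :: qs) =
        (if innerScanA num q (fun t => check2A q t liste) (PySem.List.pyRange 100 1000) then true
         else outerA2 num liste qs) from rfl]
    rw [innerScanA_pyRange num q _ hq 100 1000]
    by_cases hdvd : q ∣ num
    · have hmod0 : PySem.Int.mod num q = 0 := (PySem.Int.mod_eq_zero_iff_dvd num q).mpr hdvd
      by_cases hrange : 100 ≤ PySem.Int.floordiv num q ∧ PySem.Int.floordiv num q < 1000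
      · have hcond : (PySem.Int.mod num q == 0 && decide (100 ≤ PySem.Int.floordiv num q)
            && decide (PySem.Int.floordiv num q ≤ 999)) = true := by
          simp only [Bool.and_eq_true, beq_iff_eq, decide_eq_true_eq]
          refine ⟨⟨hmod0, hrange.1⟩, by omega⟩
        rw [if_pos (show q ∣ num ∧ 100 ≤ PySem.Int.floordiv num q ∧ PySem.Int.floordiv num q < 1000
            from ⟨hdvd, hrange.1, hrange.2⟩),
          check2A_eq q _ liste (by omega) (by omega),
          ]
        simp only [List.filter_cons, hcond, if_true, List.map_cons, List.any_cons]
        rcases Bool.dichotomy (pandigitalB q (PySem.Int.floordiv num q) (PySem.Set.ofList liste)) with hp | hp <;>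
          rw [show pandigitalB ((q, PySem.Int.floordiv num q) : Int × Int).1
              ((q, PySem.Int.floordiv num q) : Int × Int).2 (PySem.Set.ofList liste)
              = pandigitalB q (PySem.Int.floordiv num q) (PySem.Set.ofList liste) from rfl, hp] <;>
          simp [ih']
      · have hcond : (PySem.Int.mod num q == 0 && decide (100 ≤ PySem.Int.floordiv num q)
            && decide (PySem.Int.floordiv num q ≤ 999)) = false := by
          simp only [Bool.and_eq_false_iff, beq_eq_false_iff_ne, ne_eq, decide_eq_false_iff_not]
          by_cases ha : (100 : Int) ≤ PySem.Int.floordiv num q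
          · right; omega
          · left; right; omega
        rw [if_neg (show ¬(q ∣ num ∧ 100 ≤ PySem.Int.floordiv num q ∧ PySem.Int.floordiv num q < 1000)
            from by rintro ⟨-, h1, h2⟩; exact hrange ⟨h1, h2⟩),
          ]
        simp only [List.filter_cons, hcond, Bool.false_eq_true, if_false]
        simp [ih']
    · have hcond : (PySem.Int.mod num q == 0 && decide (100 ≤ PySem.Int.floordiv num q)
          && decide (PySem.Int.floordiv num q ≤ 999)) = false := by
        simp only [Bool.and_eq_false_iff, beq_eq_false_iff_ne, ne_eq]
        exact Or.inl (Or.inl (fun hm => hdvd ((PySem.Int.mod_eq_zero_iff_dvd num q).mp hm)))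
      rw [if_neg (show ¬(q ∣ num ∧ 100 ≤ PySem.Int.floordiv num q ∧ PySem.Int.floordiv num q < 1000)
          from by rintro ⟨h, -⟩; exact hdvd h),
        ]
      simp only [List.filter_cons, hcond, Bool.false_eq_true, if_false]
      simp [ih']

-- ===== VERDICT (by name: the statement is the Claim_ definition above) =====
theorem check_spec : Claim_equal_check := by
  intro num liste _
  unfold Spec_check check check_alt
  rw [outerA1_eq num liste _ (by intro q hq; rw [PySem.List.mem_pyRange_one] at hq; omega),
      outerA2_eq num liste _ (by intro r hr; rw [PySem.List.mem_pyRange_one] at hr; omega)]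
  have hguard : ∀ (l : List (Int × Int)) (f : Int × Int → Bool),
      (if l.isEmpty then false else l.any f) = l.any f := by
    intro l f; cases l <;> simp
  rw [hguard, List.any_append]
  unfold pairs1B pairs2B
  rcases Bool.dichotomy ((((PySem.List.pyRange 1 10).filter (fun q =>
      PySem.Int.mod num q == 0 && decide (1000 ≤ PySem.Int.floordiv num q)
        && decide (PySem.Int.floordiv num q ≤ 9999))).map
      (fun q => (PySem.Int.floordiv num q, q))).any
      (fun p => pandigitalB p.1 p.2 (PySem.Set.ofList liste))) with h1 | h1 <;>
    rw [h1] <;> simp
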